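-- pv_equiv track=rewrite | github.com/briankeithn/narrative-maps | narratives/packages/graph_utils.py | maximum_antichain
-- ===== SOURCE A (Python) =====
-- def maximum_antichain(antichain_list, antichain_op):
--     m = len(max(antichain_list, key=len))
--     idx_list = [i for i, j in enumerate(antichain_list) if len(j) == m]
--     if antichain_op == 0:
--         max_list = min([antichain_list[i] for i in idx_list], key=sum)
--     else:
--         max_list = max([antichain_list[i] for i in idx_list], key=sum)
--     max_length = len(max_list)
--
--     return max_list, max_length
-- ===== SOURCE B (Python) =====
-- def maximum_antichain(antichain_list, antichain_op):
--     best = antichain_list[0]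
--     bl, bs = len(best), sum(best)
--     for cand in antichain_list[1:]:
--         cl = len(cand)
--         if cl < bl:
--             continue
--         cs = sum(cand)
--         if bl < cl or (cs < bs if antichain_op == 0 else bs < cs):
--             best, bl, bs = cand, cl, cs
--     return best, bl
-- ===== Notes on version B (the rewrite author's own statement) =====
-- stated objective: simpler
-- what changed: Replaces A's four passes (max-by-len, enumerate+filter, index-gather, min/max-by-sum) with a single fold keeping one best candidate with its cached length and sum; strict comparisons preserve first-occurrence tie-breaking.
-- outside the precondition, e.g. on maximum_antichain([], 0): A raises ValueError, B raises IndexError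
import Mathlib
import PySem

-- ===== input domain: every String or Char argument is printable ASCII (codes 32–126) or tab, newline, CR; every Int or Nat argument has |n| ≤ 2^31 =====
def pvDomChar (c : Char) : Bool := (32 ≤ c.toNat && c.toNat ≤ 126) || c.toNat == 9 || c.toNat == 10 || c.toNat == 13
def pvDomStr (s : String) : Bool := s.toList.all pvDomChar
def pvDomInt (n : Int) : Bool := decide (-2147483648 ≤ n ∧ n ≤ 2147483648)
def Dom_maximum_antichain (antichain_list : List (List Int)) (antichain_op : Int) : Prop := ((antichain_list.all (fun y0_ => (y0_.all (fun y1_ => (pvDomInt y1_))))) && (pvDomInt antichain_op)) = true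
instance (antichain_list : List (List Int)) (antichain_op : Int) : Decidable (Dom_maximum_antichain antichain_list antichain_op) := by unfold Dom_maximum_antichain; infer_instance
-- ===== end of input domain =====

-- B replaces A's several passes (max-by-length, filter, gather, min/max-by-sum) with a single fold
-- keeping one best candidate with its cached length and sum; strict comparisons keep first-occurrence ties.

-- ===== PORT A =====
def maximum_antichain (antichain_list : List (List Int)) (antichain_op : Int) : List Int × Int :=
  match PySem.List.max? antichain_list (fun j => (j.length : Int)) with
  | none => ([], 0)   -- Python: max([]) raises ValueError; excluded by Pre_
  | some mx =>
    let m : Int := (mx.length : Int)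
    let idx_list : List Int :=
      ((PySem.List.enumerate antichain_list 0).filter (fun p => (p.2.length : Int) == m)).map (·.1)
    -- antichain_list[i]: indices come from enumerate, hence in range, so pyGetD is exact here
    let sel : List (List Int) := idx_list.map (fun i => PySem.List.pyGetD antichain_list i [])
    let chosen : Option (List Int) :=
      if antichain_op == 0 then PySem.List.min? sel (fun j => j.sum)
      else PySem.List.max? sel (fun j => j.sum)
    match chosen with
    | none => ([], 0)   -- unreachable: sel contains the longest element
    | some c => (c, (c.length : Int))

-- ===== PORT B =====
def pvStep (antichain_op : Int) (st : List Int × Int × Int) (cand : List Int) : List Int × Int × Int :=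
  let cl : Int := (cand.length : Int)
  if cl < st.2.1 then st
  else
    let cs : Int := cand.sum
    if st.2.1 < cl ∨ (if antichain_op == 0 then cs < st.2.2 else st.2.2 < cs)
    then (cand, cl, cs) else st

def maximum_antichain_alt (antichain_list : List (List Int)) (antichain_op : Int) : List Int × Int :=
  match antichain_list with
  | [] => ([], 0)   -- Python B: antichain_list[0] raises IndexError; excluded by Pre_
  | h :: t =>
    let r := t.foldl (pvStep antichain_op) (h, (h.length : Int), h.sum)
    (r.1, r.2.1)

-- ===== PRECONDITION & SPEC =====
-- Pre_ excludes only the empty list, on which A raises ValueError (and B raises IndexError).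
def Pre_maximum_antichain (antichain_list : List (List Int)) (_antichain_op : Int) : Prop :=
  antichain_list ≠ []
instance (antichain_list : List (List Int)) (antichain_op : Int) : Decidable (Pre_maximum_antichain antichain_list antichain_op) := by unfold Pre_maximum_antichain; infer_instance

def pvWitness_maximum_antichain : List (List Int) × Int := ([[1, 2], [3], [0, 4]], 0)

def Spec_maximum_antichain (antichain_list : List (List Int)) (antichain_op : Int) (out : List Int × Int) : Prop := out = maximum_antichain_alt antichain_list antichain_op
instance (antichain_list : List (List Int)) (antichain_op : Int) (out : List Int × Int) : Decidable (Spec_maximum_antichain antichain_list antichain_op out) := by unfold Spec_maximum_antichain; infer_instance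

-- ===== CLAIM (what is proved, stated in full; the proofs are below) =====
def Claim_equal_maximum_antichain : Prop := ∀ (antichain_list : List (List Int)) (antichain_op : Int), Dom_maximum_antichain antichain_list antichain_op → Pre_maximum_antichain antichain_list antichain_op → Spec_maximum_antichain antichain_list antichain_op (maximum_antichain antichain_list antichain_op)

-- ===== LEMMAS AND PROOFS =====

-- A's chosen element, as an Option (proof helper only)
def pvChoose (l : List (List Int)) (op : Int) : Option (List Int) :=
  match PySem.List.max? l (fun j => (j.length : Int)) with
  | none => none
  | some mx =>
    let sel := l.filter (fun j => (j.length : Int) == (mx.length : Int))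
    if op == 0 then PySem.List.min? sel (fun j => j.sum)
    else PySem.List.max? sel (fun j => j.sum)

theorem pvGetD_append (pre : List (List Int)) (x : List Int) (t : List (List Int)) :
    PySem.List.pyGetD (pre ++ x :: t) (pre.length : Int) [] = x := by
  simp [PySem.List.pyGetD, PySem.List.pyGet?, PySem.List.pyIdx?]

-- the gather pass: indexing back into the list along filtered enumerate = plain filter
theorem pvGather (P : List Int → Bool) :
    ∀ (t pre : List (List Int)),
    (((PySem.List.enumerate t (pre.length : Int)).filter (fun p => P p.2)).map (·.1)).map
        (fun i => PySem.List.pyGetD (pre ++ t) i []) = t.filter P := by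
  intro t
  induction t with
  | nil => intro pre; simp [PySem.List.enumerate_nil]
  | cons x t ih =>
    intro pre
    have htail := ih (pre ++ [x])
    have h1 : ((pre ++ [x]).length : Int) = (pre.length : Int) + 1 := by simp
    have h2 : (pre ++ [x]) ++ t = pre ++ x :: t := by simp
    rw [h1, h2] at htail
    rw [PySem.List.enumerate_cons]
    by_cases hx : P x
    · simp only [List.filter_cons, hx, if_pos, List.map_cons, pvGetD_append, htail]
    · simp only [List.filter_cons, hx, Bool.false_eq_true, if_false, htail]

theorem pvA_eq_choose (l : List (List Int)) (op : Int) :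
    maximum_antichain l op =
      match pvChoose l op with
      | none => ([], 0)
      | some c => (c, (c.length : Int)) := by
  unfold maximum_antichain pvChoose
  cases hmx : PySem.List.max? l (fun j => (j.length : Int)) with
  | none => rfl
  | some mx =>
    have hg := pvGather (fun j => (j.length : Int) == (mx.length : Int)) l []
    simp only [List.length_nil, Int.natCast_zero, List.nil_append] at hg
    simp only []
    rw [hg]

-- max?/min? over an appended element take one step
theorem pvMax?_append {α : Type} (k : α → Int) (l : List α) (x : α) :
    PySem.List.max? (l ++ [x]) k =
      match PySem.List.max? l k with
      | none => some x
      | some m => if k m < k x then some x else some m := by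
  simp only [PySem.List.max?, List.foldl_append, List.foldl_cons, List.foldl_nil]
  rfl

theorem pvMin?_append {α : Type} (k : α → Int) (l : List α) (x : α) :
    PySem.List.min? (l ++ [x]) k =
      match PySem.List.min? l k with
      | none => some x
      | some m => if k x < k m then some x else some m := by
  simp only [PySem.List.min?, List.foldl_append, List.foldl_cons, List.foldl_nil]
  rfl

theorem pvChoose_len {l : List (List Int)} {op : Int} {c mx : List Int}
    (hmx : PySem.List.max? l (fun j => (j.length : Int)) = some mx)
    (hc : pvChoose l op = some c) : c.length = mx.length := by
  unfold pvChoose at hc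
  rw [hmx] at hc
  simp only [] at hc
  have hmem : c ∈ l.filter (fun j => (j.length : Int) == (mx.length : Int)) := by
    by_cases hop : op == 0
    · simp only [hop, if_true] at hc; exact PySem.List.min?_mem hc
    · simp only [hop] at hc; exact PySem.List.max?_mem hc
  have := (List.mem_filter.mp hmem).2
  simpa using this

theorem pvStep_shape (op : Int) (c x : List Int) :
    pvStep op (c, (c.length : Int), c.sum) x =
      ((pvStep op (c, (c.length : Int), c.sum) x).1,
       (((pvStep op (c, (c.length : Int), c.sum) x).1).length : Int),
       ((pvStep op (c, (c.length : Int), c.sum) x).1).sum) := by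
  simp only [pvStep]
  split_ifs <;> rfl

theorem pvChoose_append (l : List (List Int)) (x c : List Int) (op : Int)
    (hc : pvChoose l op = some c) :
    pvChoose (l ++ [x]) op = some ((pvStep op (c, (c.length : Int), c.sum) x).1) := by
  cases hmx : PySem.List.max? l (fun j => (j.length : Int)) with
  | none =>
    unfold pvChoose at hc; rw [hmx] at hc; exact absurd hc (by simp)
  | some mx =>
    have hlen : c.length = mx.length := pvChoose_len hmx hc
    unfold pvChoose at hc
    rw [hmx] at hc
    have hc' : (if (op == 0) = true
        then PySem.List.min? (l.filter (fun j => (j.length : Int) == (mx.length : Int))) (fun j => j.sum)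
        else PySem.List.max? (l.filter (fun j => (j.length : Int) == (mx.length : Int))) (fun j => j.sum))
        = some c := hc
    unfold pvChoose
    rw [pvMax?_append, hmx]
    by_cases hlt : ((mx.length : Int) < (x.length : Int))
    · -- x strictly longer: it becomes the unique longest element
      simp only [hlt, if_pos]
      have hfl : l.filter (fun j => (j.length : Int) == (x.length : Int)) = [] := by
        rw [List.filter_eq_nil_iff]
        intro y hy
        have hle := PySem.List.max?_isMax hmx y hy
        simp only [beq_iff_eq]
        omega
      have hstep : (pvStep op (c, (c.length : Int), c.sum) x).1 = x := by
        simp only [pvStep]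
        have h1 : ¬ ((x.length : Int) < (c.length : Int)) := by omega
        have h2 : ((c.length : Int) < (x.length : Int)) := by omega
        simp [h1, h2]
      rw [hstep]
      show (if (op == 0) = true
          then PySem.List.min? ((l ++ [x]).filter (fun j => (j.length : Int) == (x.length : Int))) (fun j => j.sum)
          else PySem.List.max? ((l ++ [x]).filter (fun j => (j.length : Int) == (x.length : Int))) (fun j => j.sum))
          = some x
      rw [List.filter_append, hfl]
      simp only [List.nil_append, List.filter_cons, beq_self_eq_true, if_pos, List.filter_nil]
      by_cases hop : op == 0 <;>
        simp [hop, PySem.List.min?, PySem.List.max?]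
    · -- x not longer: the longest stays mx
      simp only [hlt, if_false]
      show (if (op == 0) = true
          then PySem.List.min? ((l ++ [x]).filter (fun j => (j.length : Int) == (mx.length : Int))) (fun j => j.sum)
          else PySem.List.max? ((l ++ [x]).filter (fun j => (j.length : Int) == (mx.length : Int))) (fun j => j.sum))
          = some ((pvStep op (c, (c.length : Int), c.sum) x).1)
      by_cases heq : x.length = mx.length
      · -- equal length: x joins the selection at the end
        have hfa : (l ++ [x]).filter (fun j => (j.length : Int) == (mx.length : Int)) =
            l.filter (fun j => (j.length : Int) == (mx.length : Int)) ++ [x] := by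
          simp [List.filter_append, heq]
        rw [hfa]
        have hstep : (pvStep op (c, (c.length : Int), c.sum) x) =
            if (if (op == 0) = true then x.sum < c.sum else c.sum < x.sum)
            then (x, (x.length : Int), x.sum) else (c, (c.length : Int), c.sum) := by
          simp only [pvStep]
          have h1 : ¬ ((x.length : Int) < (c.length : Int)) := by omega
          have h2 : ¬ ((c.length : Int) < (x.length : Int)) := by omega
          simp [h1, h2]
        by_cases hop : op == 0
        · rw [pvMin?_append]
          simp only [hop, if_pos] at hc' ⊢
          rw [hc', hstep]
          simp only [hop, if_pos]
          split_ifs <;> rfl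
        · rw [pvMax?_append]
          simp only [hop, Bool.false_eq_true, if_false] at hc' ⊢
          rw [hc', hstep]
          simp only [hop, Bool.false_eq_true, if_false]
          split_ifs <;> rfl
      · -- strictly shorter: nothing changes
        have hxm : (x.length : Int) < (mx.length : Int) := by
          rcases lt_or_eq_of_le (not_lt.mp hlt) with hlt2 | hlt2
          · exact hlt2
          · exact absurd (by exact_mod_cast hlt2 : x.length = mx.length) heq
        have hfa : (l ++ [x]).filter (fun j => (j.length : Int) == (mx.length : Int)) =
            l.filter (fun j => (j.length : Int) == (mx.length : Int)) := by
          simp only [List.filter_append, List.filter_cons, beq_iff_eq]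
          have hne : ¬ ((x.length : Int) = (mx.length : Int)) := by omega
          simp [hne]
        rw [hfa]
        have hstep : (pvStep op (c, (c.length : Int), c.sum) x).1 = c := by
          simp only [pvStep]
          have h1 : ((x.length : Int) < (c.length : Int)) := by omega
          simp [h1]
        rw [hstep]
        exact hc'

theorem pvMain (op : Int) : ∀ (t : List (List Int)) (h : List Int),
    ∃ c, pvChoose (h :: t) op = some c ∧
      t.foldl (pvStep op) (h, (h.length : Int), h.sum) = (c, (c.length : Int), c.sum) := by
  intro t
  induction t using List.reverseRecOn with
  | nil =>
    intro h
    refine ⟨h, ?_, rfl⟩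
    unfold pvChoose
    by_cases hop : op == 0 <;>
      simp [PySem.List.max?, PySem.List.min?, hop]
  | append_singleton t x ih =>
    intro h
    obtain ⟨c, hc, hf⟩ := ih h
    have hca := pvChoose_append (h :: t) x c op hc
    refine ⟨(pvStep op (c, (c.length : Int), c.sum) x).1, ?_, ?_⟩
    · simpa using hca
    · rw [List.foldl_append, hf]
      exact pvStep_shape op c x

-- ===== VERDICT (by name: the statement is the Claim_ definition above) =====
theorem maximum_antichain_spec : Claim_equal_maximum_antichain := by
  intro l op _ hpre
  unfold Spec_maximum_antichain
  match l with
  | [] => exact absurd rfl hpre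
  | h :: t =>
    obtain ⟨c, hc, hf⟩ := pvMain op t h
    rw [pvA_eq_choose, hc]
    simp [maximum_antichain_alt, hf]
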